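-- pv_equiv track=rewrite | github.com/donggrii/python-coding-test | Programmers/Level 1/secret_map.py | solution
-- ===== SOURCE A (Python) =====
-- def solution(n, arr1, arr2):
--     answer_1 = []
--     answer_2 = []
--     final = []
--     rules = [2 ** i for i in range(n-1, -1, -1)]
--     ret = ''
--     for ans_1 in arr1:
--         for i in rules:
--             if ans_1 >= i:
--                 ret += '#'
--                 ans_1 -= i
--             else:
--                 ret += ' '
--         answer_1.append(ret)
--         ret = ''
--     for ans_2 in arr2:
--         for i in rules:
--             if ans_2 >= i:
--                 ret += '#'
--                 ans_2 -= i
--             else: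
--                 ret += ' '
--         answer_2.append(ret)
--         ret = ''
--     for i in range(n):
--         for j in range(n):
--             if answer_1[i][j] == ' ' and answer_2[i][j] == ' ':
--                 ret += ' '
--             else:
--                 ret += '#'
--         final.append(ret)
--         ret = ''
--     return final
-- ===== SOURCE B (Python) =====
-- def solution(n, arr1, arr2):
--     # One fused pass: decode both rows together and emit the overlay directly,
--     # with no intermediate answer_1 / answer_2 grids and no second comparison pass.
--     rules = [2 ** i for i in range(n - 1, -1, -1)]
--     final = []
--     for i in range(n):
--         rem1 = arr1[i]
--         rem2 = arr2[i]
--         row = []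
--         for p in rules:
--             bit1 = rem1 >= p
--             bit2 = rem2 >= p
--             if bit1:
--                 rem1 -= p
--             if bit2:
--                 rem2 -= p
--             row.append('#' if bit1 or bit2 else ' ')
--         final.append(''.join(row))
--     return final
-- ===== Notes on version B (the rewrite author's own statement) =====
-- stated objective: simpler
-- what changed: Single fused pass: for each row index, both integers are decoded in lockstep over the power-of-two rules and the overlay character is emitted directly, eliminating the two intermediate decoded grids and the nested character-comparison pass.
-- outside the precondition, e.g. on solution(1, [3, 3], []): A returns ['#'], B raises IndexError
import Mathlib
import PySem

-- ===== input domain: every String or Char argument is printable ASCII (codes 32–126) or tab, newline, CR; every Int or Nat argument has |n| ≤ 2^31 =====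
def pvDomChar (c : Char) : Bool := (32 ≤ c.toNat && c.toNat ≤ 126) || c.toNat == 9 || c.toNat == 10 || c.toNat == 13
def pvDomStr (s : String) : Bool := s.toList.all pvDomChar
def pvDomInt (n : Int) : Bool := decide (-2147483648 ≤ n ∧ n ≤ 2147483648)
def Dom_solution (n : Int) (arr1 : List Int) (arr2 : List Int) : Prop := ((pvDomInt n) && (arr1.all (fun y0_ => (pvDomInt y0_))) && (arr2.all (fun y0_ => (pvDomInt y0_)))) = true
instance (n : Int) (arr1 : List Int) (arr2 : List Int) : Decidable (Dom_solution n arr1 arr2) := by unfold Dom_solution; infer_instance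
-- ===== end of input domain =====

-- B fuses A's three passes into one: each row is decoded for both inputs in lockstep and
-- the overlay characters are emitted directly (no intermediate grids); return value only.

-- ===== PORT A =====
-- rules = [2 ** i for i in range(n-1, -1, -1)]  (shared by both ports: both sources compute it identically)
def solRules (n : Int) : List Int :=
  (PySem.List.pyRange (n - 1) (-1) (-1)).map (fun i => 2 ^ i.toNat)

-- inner loop 'for i in rules: …' building ret (Python str ported as List Char, String.ofList at append)
def decodeRowA (rules : List Int) (x : Int) : List Char :=
  (rules.foldl (fun (s : List Char × Int) i =>
      if s.2 ≥ i then (s.1 ++ ['#'], s.2 - i) else (s.1 ++ [' '], s.2)) ([], x)).1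

-- third loop body: 'for j in range(n): …' over answer_1[i] / answer_2[i]
def combineRowA (r1 r2 : String) (n : Int) : List Char :=
  (PySem.List.pyRange 0 n 1).foldl (fun ret j =>
      if (PySem.Str.pyGet? r1 j).getD ' ' = ' ' ∧ (PySem.Str.pyGet? r2 j).getD ' ' = ' '
      then ret ++ [' '] else ret ++ ['#']) []

def solution (n : Int) (arr1 : List Int) (arr2 : List Int) : List String :=
  let rules := solRules n
  let answer1 := arr1.foldl (fun acc x => acc ++ [String.ofList (decodeRowA rules x)]) []
  let answer2 := arr2.foldl (fun acc x => acc ++ [String.ofList (decodeRowA rules x)]) []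
  (PySem.List.pyRange 0 n 1).foldl (fun final i =>
      final ++ [String.ofList (combineRowA (PySem.List.pyGetD answer1 i "") (PySem.List.pyGetD answer2 i "") n)]) []

-- ===== PORT B =====
-- inner loop 'for p in rules: …' on state (row, rem1, rem2)
def rowB (rules : List Int) (a b : Int) : List Char :=
  (rules.foldl (fun (s : List Char × Int × Int) p =>
      (s.1 ++ [if s.2.1 ≥ p ∨ s.2.2 ≥ p then '#' else ' '],
       (if s.2.1 ≥ p then s.2.1 - p else s.2.1),
       (if s.2.2 ≥ p then s.2.2 - p else s.2.2))) ([], a, b)).1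

def solution_alt (n : Int) (arr1 : List Int) (arr2 : List Int) : List String :=
  let rules := solRules n
  (PySem.List.pyRange 0 n 1).foldl (fun final i =>
      final ++ [String.ofList (rowB rules (PySem.List.pyGetD arr1 i 0) (PySem.List.pyGetD arr2 i 0))]) []

-- ===== PRECONDITION & SPEC =====
-- Pre_ excludes inputs where either list is shorter than n: A raises IndexError there, except when
-- its short-circuit 'and' happens never to read the missing answer_2 row (an accident of evaluation
-- order on which B, which indexes both lists, naturally raises).
def Pre_solution (n : Int) (arr1 : List Int) (arr2 : List Int) : Prop :=
  n ≤ (arr1.length : Int) ∧ n ≤ (arr2.length : Int)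
instance (n : Int) (arr1 : List Int) (arr2 : List Int) : Decidable (Pre_solution n arr1 arr2) := by unfold Pre_solution; infer_instance

def pvWitness_solution : Int × List Int × List Int := (2, [1, 2], [3, 0])

def Spec_solution (n : Int) (arr1 : List Int) (arr2 : List Int) (out : List String) : Prop := out = solution_alt n arr1 arr2
instance (n : Int) (arr1 : List Int) (arr2 : List Int) (out : List String) : Decidable (Spec_solution n arr1 arr2 out) := by unfold Spec_solution; infer_instance

-- ===== CLAIM (what is proved, stated in full; the proofs are below) =====
def Claim_equal_solution : Prop := ∀ (n : Int) (arr1 : List Int) (arr2 : List Int), Dom_solution n arr1 arr2 → Pre_solution n arr1 arr2 → Spec_solution n arr1 arr2 (solution n arr1 arr2)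

-- ===== LEMMAS AND PROOFS =====

-- structural characterisation of A's row decoder
def decChars : List Int → Int → List Char
  | [], _ => []
  | p :: ps, x => if x ≥ p then '#' :: decChars ps (x - p) else ' ' :: decChars ps x

theorem decodeRowA_go (rules : List Int) (x : Int) (acc : List Char) :
    (rules.foldl (fun (s : List Char × Int) i =>
      if s.2 ≥ i then (s.1 ++ ['#'], s.2 - i) else (s.1 ++ [' '], s.2)) (acc, x)).1
    = acc ++ decChars rules x := by
  induction rules generalizing x acc with
  | nil => simp [decChars]
  | cons p ps ih =>
    simp only [List.foldl_cons, decChars]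
    by_cases h : x ≥ p <;> simp [h, ih]

theorem decodeRowA_eq (rules : List Int) (x : Int) :
    decodeRowA rules x = decChars rules x := by
  simpa using decodeRowA_go rules x []

theorem length_decChars (rules : List Int) (x : Int) :
    (decChars rules x).length = rules.length := by
  induction rules generalizing x with
  | nil => simp [decChars]
  | cons p ps ih => simp only [decChars]; split <;> simp [ih]

-- structural characterisation of B's fused row
def bothChars : List Int → Int → Int → List Char
  | [], _, _ => []
  | p :: ps, a, b =>
      (if a ≥ p ∨ b ≥ p then '#' else ' ') ::
        bothChars ps (if a ≥ p then a - p else a) (if b ≥ p then b - p else b)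

theorem rowB_go (rules : List Int) (a b : Int) (acc : List Char) :
    (rules.foldl (fun (s : List Char × Int × Int) p =>
      (s.1 ++ [if s.2.1 ≥ p ∨ s.2.2 ≥ p then '#' else ' '],
       (if s.2.1 ≥ p then s.2.1 - p else s.2.1),
       (if s.2.2 ≥ p then s.2.2 - p else s.2.2))) (acc, a, b)).1
    = acc ++ bothChars rules a b := by
  induction rules generalizing a b acc with
  | nil => simp [bothChars]
  | cons p ps ih =>
    simp only [List.foldl_cons, bothChars]
    by_cases h1 : a ≥ p <;> by_cases h2 : b ≥ p <;>
      simp [h1, h2, ih]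

theorem rowB_eq (rules : List Int) (a b : Int) :
    rowB rules a b = bothChars rules a b := by
  simpa [rowB] using rowB_go rules a b []

-- the per-character overlay
def combC (c1 c2 : Char) : Char := if c1 = ' ' ∧ c2 = ' ' then ' ' else '#'

theorem zipWith_comb_dec (rules : List Int) (a b : Int) :
    List.zipWith combC (decChars rules a) (decChars rules b) = bothChars rules a b := by
  induction rules generalizing a b with
  | nil => simp [decChars, bothChars]
  | cons p ps ih =>
    simp only [decChars, bothChars]
    by_cases h1 : a ≥ p <;> by_cases h2 : b ≥ p <;>
      simp [h1, h2, List.zipWith, ih, combC]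

-- A's index-driven overlay loop over range(n) equals zipWith on the two rows, given both have length n
theorem combineRowA_eq_zipWith (l1 l2 : List Char) (n : Int)
    (h1 : (l1.length : Int) = n) (h2 : (l2.length : Int) = n) :
    combineRowA (String.ofList l1) (String.ofList l2) n = List.zipWith combC l1 l2 := by
  have hfold : combineRowA (String.ofList l1) (String.ofList l2) n
      = (PySem.List.pyRange 0 n 1).map (fun j =>
          combC ((PySem.Str.pyGet? (String.ofList l1) j).getD ' ')
                ((PySem.Str.pyGet? (String.ofList l2) j).getD ' ')) := by
    unfold combineRowA
    -- rewrite if-then-else (append ' ' / '#') into a single map of combC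
    rw [show (fun (ret : List Char) j =>
          if (PySem.Str.pyGet? (String.ofList l1) j).getD ' ' = ' ' ∧
             (PySem.Str.pyGet? (String.ofList l2) j).getD ' ' = ' '
          then ret ++ [' '] else ret ++ ['#'])
        = (fun (ret : List Char) j => ret ++
            [combC ((PySem.Str.pyGet? (String.ofList l1) j).getD ' ')
                   ((PySem.Str.pyGet? (String.ofList l2) j).getD ' ')]) from by
          funext ret j; unfold combC; split <;> simp_all]
    simpa using PySem.List.foldl_append_singleton_eq_map
      (l := PySem.List.pyRange 0 n 1) (acc := ([] : List Char))
      (f := fun j => combC ((PySem.Str.pyGet? (String.ofList l1) j).getD ' ')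
                           ((PySem.Str.pyGet? (String.ofList l2) j).getD ' '))
  rw [hfold]
  have hn : 0 ≤ n := by omega
  apply List.ext_getElem
  · simp [PySem.List.length_pyRange_one, h1, h2]
    omega
  · intro k hk hk'
    have hkn : (k : Int) < n := by
      have := hk; simp [PySem.List.length_pyRange_one] at this; omega
    have hk1 : k < l1.length := by omega
    have hk2 : k < l2.length := by omega
    simp [PySem.List.getElem_pyRange_one, PySem.Str.pyGet?_natCast,
      List.getElem?_eq_getElem, hk1, hk2]

-- length of a decoded row, as an Int, is n (for 0 ≤ n)
theorem length_rules (n : Int) (hn : 0 ≤ n) : ((solRules n).length : Int) = n := by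
  simp [solRules, PySem.List.pyRange_neg_one]
  omega

theorem solution_eq_map (n : Int) (arr1 arr2 : List Int)
    (h1 : n ≤ (arr1.length : Int)) (h2 : n ≤ (arr2.length : Int)) :
    solution n arr1 arr2
    = (PySem.List.pyRange 0 n 1).map (fun i =>
        String.ofList (List.zipWith combC
          (decChars (solRules n) (PySem.List.pyGetD arr1 i 0))
          (decChars (solRules n) (PySem.List.pyGetD arr2 i 0)))) := by
  unfold solution
  simp only [PySem.List.foldl_append_singleton_eq_map, List.nil_append]
  apply List.map_congr_left
  intro i hi
  have hi' := (PySem.List.mem_pyRange_one).1 hi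
  have h0 : 0 ≤ i := hi'.1
  have hilt : i < n := hi'.2
  have hi1 : i.toNat < arr1.length := by omega
  have hi2 : i.toNat < arr2.length := by omega
  have g1 : PySem.List.pyGetD
      (arr1.map (fun x => String.ofList (decodeRowA (solRules n) x))) i ""
      = String.ofList (decodeRowA (solRules n) arr1[i.toNat]) := by
    rw [PySem.List.pyGetD_eq_getElem _ _ h0 (by simpa using (by omega : i < (arr1.length : Int)))]
    simp
  have g2 : PySem.List.pyGetD
      (arr2.map (fun x => String.ofList (decodeRowA (solRules n) x))) i ""
      = String.ofList (decodeRowA (solRules n) arr2[i.toNat]) := by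
    rw [PySem.List.pyGetD_eq_getElem _ _ h0 (by simpa using (by omega : i < (arr2.length : Int)))]
    simp
  rw [g1, g2, decodeRowA_eq, decodeRowA_eq,
    combineRowA_eq_zipWith _ _ n
      (by rw [length_decChars]; exact length_rules n (by omega))
      (by rw [length_decChars]; exact length_rules n (by omega))]
  rw [PySem.List.pyGetD_eq_getElem _ _ h0 (by omega),
      PySem.List.pyGetD_eq_getElem _ _ h0 (by omega)]

-- ===== VERDICT (by name: the statement is the Claim_ definition above) =====
theorem solution_spec : Claim_equal_solution := by
  intro n arr1 arr2 _ hpre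
  unfold Spec_solution
  rw [solution_eq_map n arr1 arr2 hpre.1 hpre.2]
  unfold solution_alt
  simp only [PySem.List.foldl_append_singleton_eq_map, List.nil_append]
  apply List.map_congr_left
  intro i _
  rw [rowB_eq, zipWith_comb_dec]
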